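-- pv_equiv track=rewrite | github.com/dvrshi/huffman_encoding | huffman.py | decompress_string
-- ===== SOURCE A (Python) =====
-- def decompress_string(encoded_bytes, reverse_mapping):
--     bit_string = ""
--     for byte in encoded_bytes:
--         bits = bin(byte)[2:].rjust(8, '0')
--         bit_string += bits
--
--     padded_info = bit_string[:8]
--     extra_padding = int(padded_info, 2)
--
--     bit_string = bit_string[8:]
--     encoded_text = bit_string[:-1 * extra_padding]
--
--     current_code = ""
--     decoded_text = ""
--     for bit in encoded_text:
--         current_code += bit
--         if current_code in reverse_mapping:
--             character = reverse_mapping[current_code]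
--             decoded_text += character
--             current_code = ""
--     return decoded_text
-- ===== SOURCE B (Python) =====
-- def decompress_string(encoded_bytes, reverse_mapping):
--     bits = ''.join(bin(b)[2:].rjust(8, '0') for b in encoded_bytes)
--     padding = int(bits[:8], 2)
--     data = bits[8:][:-padding]
--     # decoding trie: node = [character-or-None, {char: child}]
--     root = [None, {}]
--     for code, ch in reverse_mapping.items():
--         node = root
--         for c in code:
--             node = node[1].setdefault(c, [None, {}])
--         if node[0] is None:
--             node[0] = ch
--     out = []
--     node = root
--     for b in data:
--         node = node[1].get(b) if node is not None else None
--         if node is not None and node[0] is not None: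
--             out.append(node[0])
--             node = root
--     return ''.join(out)
-- ===== Notes on version B (the rewrite author's own statement) =====
-- stated objective: alternative
-- what changed: B keeps A's byte-to-bit assembly and padding strip, but replaces A's decode loop (re-hash the ever-growing accumulated code string against the dict on every bit) by a decoding trie built once from reverse_mapping and walked one node per bit, resetting to the root on each emitted character.
import Mathlib
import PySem

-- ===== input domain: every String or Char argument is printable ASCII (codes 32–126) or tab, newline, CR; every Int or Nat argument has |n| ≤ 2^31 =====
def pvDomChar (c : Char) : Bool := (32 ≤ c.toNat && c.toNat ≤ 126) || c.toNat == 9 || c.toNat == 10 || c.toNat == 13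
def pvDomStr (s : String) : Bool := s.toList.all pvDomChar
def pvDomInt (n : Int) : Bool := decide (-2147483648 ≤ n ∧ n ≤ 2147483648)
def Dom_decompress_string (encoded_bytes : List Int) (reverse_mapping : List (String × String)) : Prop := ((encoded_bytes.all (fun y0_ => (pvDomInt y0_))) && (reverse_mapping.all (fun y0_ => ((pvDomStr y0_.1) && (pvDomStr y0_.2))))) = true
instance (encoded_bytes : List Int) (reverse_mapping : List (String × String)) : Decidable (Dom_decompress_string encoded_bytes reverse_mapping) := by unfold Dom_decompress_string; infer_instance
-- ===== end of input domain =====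

-- B replaces A's per-bit dict lookup of the growing code string by a decoding trie
-- walked one bit at a time (objective: alternative / idiomatic decoder automaton).

-- ===== PORT A =====
-- bin(byte)[2:].rjust(8, '0')  — slice [2:] is PySem.List.slice; rjust(8,'0') on a
-- char list is exactly left-padding with '0' to length 8 (exact for any length)
def pyBits8 (byte : Int) : List Char :=
  let bits := PySem.List.slice (PySem.Int.toBinChars0b byte) (some 2) none
  List.replicate (8 - bits.length) '0' ++ bits

def decompress_string (encoded_bytes : List Int) (reverse_mapping : List (String × String)) : String :=
  let d : PySem.Dict String String := PySem.Dict.mk reverse_mapping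
  let bit_string : List Char := encoded_bytes.foldl (fun acc byte => acc ++ pyBits8 byte) []
  let padded_info := PySem.List.slice bit_string none (some 8)
  match PySem.Int.ofCharsBase? padded_info 2 with
  | none => ""   -- int(padded_info, 2) raises ValueError here; excluded by Pre_
  | some extra_padding =>
    let bit_string := PySem.List.slice bit_string (some 8) none
    let encoded_text := PySem.List.slice bit_string none (some (-1 * extra_padding))
    let r := encoded_text.foldl
      (fun (st : List Char × List Char) bit =>
        let current_code := st.1 ++ [bit]
        if d.contains (String.ofList current_code) then
          (([] : List Char), st.2 ++ (d.getD (String.ofList current_code) "").toList)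
        else (current_code, st.2)) ([], [])
    String.ofList r.2

-- ===== PORT B =====
-- decoding trie of Source B: node = [character-or-None, {char: child}]; `nil` is Python's
-- "no node" (None / missing dict entry), children are a total function with nil default
inductive HTrie where
  | nil : HTrie
  | node : Option String → (Char → HTrie) → HTrie

-- node[1].setdefault(c, [None, {}]) first materialises a fresh empty node
def trieEnsure : HTrie → HTrie
  | .nil => .node none (fun _ => .nil)
  | t => t

def trieIns : HTrie → List Char → String → HTrie
  | .nil, _, _ => .nil   -- unreachable: insertion always starts at a real node
  | .node w f, [], v => .node (if w.isSome then w else some v) f   -- if node[0] is None: node[0] = ch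
  | .node w f, c :: cs, v =>
      .node w (fun c' => if c' = c then trieIns (trieEnsure (f c)) cs v else f c')

def trieBuild (rm : List (String × String)) : HTrie :=
  rm.foldl (fun t kv => trieIns t kv.1.toList kv.2) (.node none (fun _ => .nil))

-- node[1].get(b) if node is not None else None
def trieChild : HTrie → Char → HTrie
  | .nil, _ => .nil
  | .node _ f, c => f c

def decompress_string_alt (encoded_bytes : List Int) (reverse_mapping : List (String × String)) : String :=
  let bits : List Char := (encoded_bytes.map pyBits8).flatten
  match PySem.Int.ofCharsBase? (PySem.List.slice bits none (some 8)) 2 with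
  | none => ""   -- int(bits[:8], 2) raises ValueError in Source B too; excluded by Pre_
  | some padding =>
    let data := PySem.List.slice (PySem.List.slice bits (some 8) none) none (some (-padding))
    let root := trieBuild reverse_mapping
    let r := data.foldl
      (fun (st : HTrie × List Char) b =>
        match trieChild st.1 b with
        | .node (some ch) _ => (root, st.2 ++ ch.toList)
        | t => (t, st.2)) (root, ([] : List Char))
    String.ofList r.2

-- ===== PRECONDITION & SPEC =====
-- Pre_ excludes exactly the inputs where A raises ValueError in int(padded_info, 2):
-- an empty byte list (empty literal) or a negative first byte whose bin() rendering
-- puts '-'/'b' among the first 8 bit-string characters — every negative first byte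
-- except −63..−32, whose rendering starts '0b' + 6 digits, itself a valid base-2 literal.
def Pre_decompress_string (encoded_bytes : List Int) (reverse_mapping : List (String × String)) : Prop :=
  encoded_bytes ≠ [] ∧
    (0 ≤ encoded_bytes.headI ∨ (-63 ≤ encoded_bytes.headI ∧ encoded_bytes.headI ≤ -32))
instance (encoded_bytes : List Int) (reverse_mapping : List (String × String)) : Decidable (Pre_decompress_string encoded_bytes reverse_mapping) := by unfold Pre_decompress_string; infer_instance

def pvWitness_decompress_string : List Int × (List (String × String)) := ([2, 128], [("0", "a"), ("1", "b")])

def Spec_decompress_string (encoded_bytes : List Int) (reverse_mapping : List (String × String)) (out : String) : Prop := out = decompress_string_alt encoded_bytes reverse_mapping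
instance (encoded_bytes : List Int) (reverse_mapping : List (String × String)) (out : String) : Decidable (Spec_decompress_string encoded_bytes reverse_mapping out) := by unfold Spec_decompress_string; infer_instance

-- ===== CLAIM (what is proved, stated in full; the proofs are below) =====
def Claim_equal_decompress_string : Prop := ∀ (encoded_bytes : List Int) (reverse_mapping : List (String × String)), Dom_decompress_string encoded_bytes reverse_mapping → Pre_decompress_string encoded_bytes reverse_mapping → Spec_decompress_string encoded_bytes reverse_mapping (decompress_string encoded_bytes reverse_mapping)

-- ===== LEMMAS AND PROOFS =====

-- the value stored at a node (Python node[0], None for a dead branch)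
def valOf : HTrie → Option String
  | .nil => none
  | .node w _ => w

-- the node reached from t by walking the characters of p
def pathT (t : HTrie) (p : List Char) : HTrie := p.foldl trieChild t

-- the character recorded at the end of path p (none: no node / no character)
def trieG (t : HTrie) (p : List Char) : Option String := valOf (pathT t p)

theorem pathT_nil_absorb (p : List Char) : pathT .nil p = .nil := by
  induction p with
  | nil => rfl
  | cons c ps ih => simpa [pathT, trieChild] using ih

theorem trieG_nil (p : List Char) : trieG .nil p = none := by
  simp [trieG, pathT_nil_absorb, valOf]

theorem trieG_node_nil (w : Option String) (f : Char → HTrie) : trieG (.node w f) [] = w := rfl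

theorem trieG_node_cons (w : Option String) (f : Char → HTrie) (d : Char) (ps : List Char) :
    trieG (.node w f) (d :: ps) = trieG (f d) ps := rfl

theorem trieG_ensure (t : HTrie) (p : List Char) : trieG (trieEnsure t) p = trieG t p := by
  cases t with
  | nil =>
      cases p with
      | nil => rfl
      | cons d ps => simp [trieEnsure, trieG_node_cons, trieG_nil]
  | node w f => rfl

theorem trieEnsure_node (t : HTrie) : ∃ w f, trieEnsure t = .node w f := by
  cases t with
  | nil => exact ⟨none, fun _ => .nil, rfl⟩
  | node w f => exact ⟨w, f, rfl⟩

theorem trieIns_node (w : Option String) (f : Char → HTrie) (cs : List Char) (v : String) :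
    ∃ w' f', trieIns (.node w f) cs v = .node w' f' := by
  cases cs with
  | nil => exact ⟨_, _, rfl⟩
  | cons c cs' => exact ⟨_, _, rfl⟩

-- inserting key cs changes the stored character only at path cs, and only if absent
theorem trieG_ins (cs : List Char) (v : String) :
    ∀ (p : List Char) (w : Option String) (f : Char → HTrie),
      trieG (trieIns (.node w f) cs v) p =
        if p = cs then (match trieG (.node w f) p with | some u => some u | none => some v)
        else trieG (.node w f) p := by
  induction cs with
  | nil =>
      intro p w f
      cases p with
      | nil => cases w <;> simp [trieIns, trieG_node_nil]
      | cons d ps => simp [trieIns, trieG_node_cons]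
  | cons c cs' ih =>
      intro p w f
      cases p with
      | nil => simp [trieIns, trieG_node_nil]
      | cons d ps =>
          by_cases hd : d = c
          · subst hd
            obtain ⟨w0, f0, he⟩ := trieEnsure_node (f d)
            have h1 : trieG (trieIns (trieEnsure (f d)) cs' v) ps =
                if ps = cs' then (match trieG (f d) ps with | some u => some u | none => some v)
                else trieG (f d) ps := by
              rw [he, ih ps w0 f0, ← he]
              simp [trieG_ensure]
            simp only [trieIns, trieG_node_cons, if_true]
            rw [h1]
            by_cases hps : ps = cs' <;> simp [hps]
          · simp [trieIns, trieG_node_cons, hd]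

theorem str_ofList_eq_iff (k : String) (p : List Char) : k = String.ofList p ↔ k.toList = p := by
  constructor
  · intro h; subst h; simp
  · intro h; exact Eq.symm (String.ofList_eq.mpr h.symm)

-- the trie built from the mapping answers exactly like the first-match dict lookup
theorem trieG_foldl (rm : List (String × String)) :
    ∀ (w : Option String) (f : Char → HTrie) (p : List Char),
      trieG (rm.foldl (fun t kv => trieIns t kv.1.toList kv.2) (.node w f)) p =
        match trieG (.node w f) p with
        | some u => some u
        | none => (PySem.Dict.mk rm).get? (String.ofList p) := by
  induction rm with
  | nil =>
      intro w f p
      cases h : trieG (.node w f) p <;> simp [h, PySem.Dict.get?]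
  | cons kv rest ih =>
      intro w f p
      obtain ⟨k, v⟩ := kv
      obtain ⟨w', f', he⟩ := trieIns_node w f k.toList v
      simp only [List.foldl_cons]
      rw [he, ih w' f' p, ← he, trieG_ins]
      rw [PySem.Dict.get?_mk_cons]
      by_cases hp : p = k.toList
      · have hk : (k == String.ofList p) = true := by
          simp [hp]
        cases h : trieG (.node w f) p <;> simp [hp]
      · have hk : (k == String.ofList p) = false := by
          simp only [beq_eq_false_iff_ne, ne_eq, str_ofList_eq_iff]
          exact fun h => hp h.symm
        cases h : trieG (.node w f) p <;> simp [hp, hk]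

theorem trieG_build (rm : List (String × String)) (p : List Char) :
    trieG (trieBuild rm) p = (PySem.Dict.mk rm).get? (String.ofList p) := by
  have h0 : trieG (.node none (fun _ => HTrie.nil)) p = none := by
    cases p with
    | nil => rfl
    | cons d ps => simp [trieG_node_cons, trieG_nil]
  rw [trieBuild, trieG_foldl, h0]

theorem pathT_snoc (t : HTrie) (p : List Char) (b : Char) :
    pathT t (p ++ [b]) = trieChild (pathT t p) b := by
  simp [pathT, List.foldl_append]

-- A's accumulate-and-look-up loop equals B's trie walk (decoded texts agree),
-- given that the pending code, if nonempty, has not matched yet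
theorem decode_loop (rm : List (String × String)) :
    ∀ (bs : List Char) (code dec : List Char),
      (code ≠ [] → (PySem.Dict.mk rm).get? (String.ofList code) = none) →
      (bs.foldl
        (fun (st : List Char × List Char) bit =>
          let current_code := st.1 ++ [bit]
          if (PySem.Dict.mk rm).contains (String.ofList current_code) then
            (([] : List Char), st.2 ++ ((PySem.Dict.mk rm).getD (String.ofList current_code) "").toList)
          else (current_code, st.2)) (code, dec)).2 =
      (bs.foldl
        (fun (st : HTrie × List Char) b =>
          match trieChild st.1 b with
          | .node (some ch) _ => (trieBuild rm, st.2 ++ ch.toList)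
          | t => (t, st.2)) (pathT (trieBuild rm) code, dec)).2 := by
  intro bs
  induction bs with
  | nil => intro code dec h; rfl
  | cons b bs ih =>
      intro code dec h
      have hstep : trieChild (pathT (trieBuild rm) code) b = pathT (trieBuild rm) (code ++ [b]) :=
        (pathT_snoc _ _ _).symm
      have hval : valOf (pathT (trieBuild rm) (code ++ [b])) =
          (PySem.Dict.mk rm).get? (String.ofList (code ++ [b])) := trieG_build rm (code ++ [b])
      rw [List.foldl_cons, List.foldl_cons]
      cases hg : (PySem.Dict.mk rm).get? (String.ofList (code ++ [b])) with
      | some ch =>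
          have hc : (PySem.Dict.mk rm).contains (String.ofList (code ++ [b])) = true := by
            rw [PySem.Dict.contains_eq_isSome_get?, hg]; rfl
          have hD : (PySem.Dict.mk rm).getD (String.ofList (code ++ [b])) "" = ch := by
            rw [PySem.Dict.getD_eq_get?_getD, hg]; rfl
          obtain ⟨f0, ht⟩ : ∃ f0, pathT (trieBuild rm) (code ++ [b]) = .node (some ch) f0 := by
            rw [hg] at hval
            cases ht : pathT (trieBuild rm) (code ++ [b]) with
            | nil => rw [ht] at hval; exact absurd hval (by simp [valOf])
            | node w0 fx =>
                rw [ht] at hval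
                simp only [valOf] at hval
                exact ⟨fx, by rw [hval]⟩
          have hrec := ih [] (dec ++ ch.toList) (fun hne => absurd rfl hne)
          simp only [hstep, ht, hc, hD, if_true]
          exact hrec
      | none =>
          have hc : (PySem.Dict.mk rm).contains (String.ofList (code ++ [b])) = false := by
            rw [PySem.Dict.contains_eq_isSome_get?, hg]; rfl
          have hrec := ih (code ++ [b]) dec (fun _ => hg)
          simp only [hstep, hc, Bool.false_eq_true, if_false]
          rw [hg] at hval
          cases ht : pathT (trieBuild rm) (code ++ [b]) with
          | nil => rw [ht] at hrec; simpa using hrec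
          | node w0 fx =>
              rw [ht] at hval hrec
              simp only [valOf] at hval
              subst hval
              simpa using hrec

-- ===== VERDICT (by name: the statement is the Claim_ definition above) =====
theorem decompress_string_spec : Claim_equal_decompress_string := by
  intro encoded_bytes reverse_mapping _ _
  unfold Spec_decompress_string decompress_string decompress_string_alt
  have hbits : encoded_bytes.foldl (fun acc byte => acc ++ pyBits8 byte) [] =
      (encoded_bytes.map pyBits8).flatten := by
    rw [PySem.List.foldl_append_eq_flatMap]
    simp [List.flatMap_def]
  simp only [hbits]
  cases hparse : PySem.Int.ofCharsBase?
      (PySem.List.slice ((encoded_bytes.map pyBits8).flatten) none (some 8)) 2 with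
  | none => rfl
  | some extra =>
      simp only [neg_one_mul]
      exact congrArg String.ofList
        (decode_loop reverse_mapping _ [] [] (fun hne => absurd rfl hne))
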